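-- pv_equiv track=rewrite | github.com/Radhika74/LeetCode | 08_August_2025/Week5/03_diagonal_v_shaped.py | longestVPath
-- ===== SOURCE A (Python) =====
-- def longestVPath(grid):
--     n, m = len(grid), len(grid[0])
--     dirs = [(1,1),(1,-1),(-1,-1),(-1,1)]   # ↘, ↙, ↖, ↗
--     clockwise = {0:1, 1:2, 2:3, 3:0}
--
--     def expected(k):   # sequence pattern
--         if k==1: return 1
--         return 2 if k%2==0 else 0
--
--     from functools import lru_cache
--     @lru_cache(None)
--     def dfs(r,c,d,turn,k):
--         best = k
--         dr,dc = dirs[d]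
--         nr,nc = r+dr, c+dc
--         if 0<=nr<n and 0<=nc<m and grid[nr][nc]==expected(k+1):
--             best = max(best, dfs(nr,nc,d,turn,k+1))
--         if not turn:   # try clockwise turn
--             nd = clockwise[d]
--             dr,dc = dirs[nd]
--             nr,nc = r+dr, c+dc
--             if 0<=nr<n and 0<=nc<m and grid[nr][nc]==expected(k+1):
--                 best = max(best, dfs(nr,nc,nd,1,k+1))
--         return best
--
--     ans=0
--     for i in range(n):
--         for j in range(m):
--             if grid[i][j]==1:
--                 for d in range(4):
--                     ans = max(ans, dfs(i,j,d,0,1))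
--     return ans
-- ===== SOURCE B (Python) =====
-- def longestVPath(grid):
--     n, m = len(grid), len(grid[0])
--     dirs = [(1, 1), (1, -1), (-1, -1), (-1, 1)]   # clockwise order
--
--     # Bottom-up tabulation, no recursion: each table cell depends only on the
--     # next cell along its direction, so two directional sweeps fill everything.
--     # straight[(d,r,c)] = longest valid continuation from (r,c) along d, no turn left.
--     straight = {}
--     for d in range(4):
--         dr, dc = dirs[d]
--         rows = reversed(range(n)) if dr == 1 else range(n)
--         for r in rows:
--             cols = reversed(range(m)) if dc == 1 else range(m)
--             for c in cols:
--                 need = 0 if grid[r][c] == 2 else 2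
--                 nr, nc = r + dr, c + dc
--                 if 0 <= nr < n and 0 <= nc < m and grid[nr][nc] == need:
--                     straight[(d, r, c)] = 1 + straight.get((d, nr, nc), 0)
--                 else:
--                     straight[(d, r, c)] = 0
--     # bent[(d,r,c)] = longest continuation with one clockwise turn still available.
--     bent = {}
--     for d in range(4):
--         dr, dc = dirs[d]
--         nd = (d + 1) % 4
--         tdr, tdc = dirs[nd]
--         rows = reversed(range(n)) if dr == 1 else range(n)
--         for r in rows:
--             cols = reversed(range(m)) if dc == 1 else range(m)
--             for c in cols:
--                 need = 0 if grid[r][c] == 2 else 2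
--                 best = 0
--                 nr, nc = r + dr, c + dc
--                 if 0 <= nr < n and 0 <= nc < m and grid[nr][nc] == need:
--                     best = 1 + bent.get((d, nr, nc), 0)
--                 tr, tc = r + tdr, c + tdc
--                 if 0 <= tr < n and 0 <= tc < m and grid[tr][tc] == need:
--                     best = max(best, 1 + straight.get((nd, tr, tc), 0))
--                 bent[(d, r, c)] = best
--     ans = 0
--     for i in range(n):
--         for j in range(m):
--             if grid[i][j] == 1:
--                 for d in range(4):
--                     ans = max(ans, 1 + bent.get((d, i, j), 0))
--     return ans
-- ===== Notes on version B (the rewrite author's own statement) =====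
-- stated objective: alternative
-- what changed: Replaced A's top-down memoized DFS (cache keyed by (r,c,d,turn,k), so O(n*m*(n+m)) states) with recursion-free bottom-up tabulation: two directional sweeps fill 'straight' and 'bent' tables of O(n*m) entries each, the next required value being derived from the current cell instead of the absolute length k.
import Mathlib
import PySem

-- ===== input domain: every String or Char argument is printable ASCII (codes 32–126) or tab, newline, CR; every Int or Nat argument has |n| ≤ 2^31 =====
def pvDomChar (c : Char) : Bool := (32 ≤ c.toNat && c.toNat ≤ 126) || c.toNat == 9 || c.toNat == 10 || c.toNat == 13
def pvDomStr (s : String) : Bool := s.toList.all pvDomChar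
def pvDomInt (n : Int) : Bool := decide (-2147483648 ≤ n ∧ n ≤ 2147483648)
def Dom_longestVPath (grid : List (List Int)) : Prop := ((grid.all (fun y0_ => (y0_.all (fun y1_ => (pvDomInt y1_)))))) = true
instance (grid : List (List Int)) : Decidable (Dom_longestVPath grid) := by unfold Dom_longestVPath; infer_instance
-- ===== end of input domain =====

-- B replaces A's top-down memoized DFS (cache keyed by (r,c,d,turn,k)) with recursion-free
-- bottom-up tabulation: two directional sweeps fill 'straight' and 'bent' tables keyed by
-- (d,r,c) only; the next required value is derived from the current cell, not from length k.


-- ===== PORT A =====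
-- grid[r][c]; every use is guarded by 0 ≤ r < n, 0 ≤ c < m, so under Pre_ (rectangular-enough
-- grid) the defaults are never consulted and this is exact.
def pvAt (grid : List (List Int)) (r c : Int) : Int :=
  PySem.List.pyGetD (PySem.List.pyGetD grid r []) c 0

-- dirs[d] for d in 0..3 (every call site has 0 ≤ d < 4)
def pvDir (d : Int) : Int × Int :=
  if d = 0 then (1, 1) else if d = 1 then (1, -1) else if d = 2 then (-1, -1) else (-1, 1)

-- the dict clockwise = {0:1, 1:2, 2:3, 3:0}
def pvClockwise (d : Int) : Int :=
  if d = 0 then 1 else if d = 1 then 2 else if d = 2 then 3 else 0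

def pvExpected (k : Int) : Int :=
  if k = 1 then 1 else if PySem.Int.mod k 2 = 0 then 2 else 0

-- dfs(r,c,d,turn,k); fuel is a termination guard only: each recursive call makes one diagonal
-- step, so the depth is bounded by the path length and the top-level fuel n+m+1 is never exhausted.
def pvDfsA (grid : List (List Int)) (n m : Int) : Nat → Int → Int → Int → Bool → Int → Int
  | 0, _, _, _, _, k => k
  | fuel + 1, r, c, d, turn, k =>
    let best := k
    let p := pvDir d
    let nr := r + p.1
    let nc := c + p.2
    let best :=
      if 0 ≤ nr ∧ nr < n ∧ 0 ≤ nc ∧ nc < m ∧ pvAt grid nr nc = pvExpected (k + 1) then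
        max best (pvDfsA grid n m fuel nr nc d turn (k + 1))
      else best
    if turn = false then
      let nd := pvClockwise d
      let q := pvDir nd
      let nr2 := r + q.1
      let nc2 := c + q.2
      if 0 ≤ nr2 ∧ nr2 < n ∧ 0 ≤ nc2 ∧ nc2 < m ∧ pvAt grid nr2 nc2 = pvExpected (k + 1) then
        max best (pvDfsA grid n m fuel nr2 nc2 nd true (k + 1))
      else best
    else best

def longestVPath (grid : List (List Int)) : Int :=
  let n : Int := PySem.List.len grid
  let m : Int := PySem.List.len (PySem.List.pyGetD grid 0 [])
  let fuel : Nat := grid.length + (grid.headD []).length + 1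
  (PySem.List.pyRange 0 n 1).foldl (fun ans i =>
    (PySem.List.pyRange 0 m 1).foldl (fun ans j =>
      if pvAt grid i j = 1 then
        (PySem.List.pyRange 0 4 1).foldl (fun ans d =>
          max ans (pvDfsA grid n m fuel i j d false 1)) ans
      else ans) ans) 0

-- ===== PORT B =====
-- B-side helpers: grid access and the dirs table (same tables as the Python's locals).
def pvCell (grid : List (List Int)) (r c : Int) : Int :=
  PySem.List.pyGetD (PySem.List.pyGetD grid r []) c 0

def pvDirB (d : Int) : Int × Int :=
  if d = 0 then (1, 1) else if d = 1 then (1, -1) else if d = 2 then (-1, -1) else (-1, 1)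

-- rows/cols processing order: reversed(range(k)) if the step is +1 else range(k)
def pvOrder (k dk : Int) : List Int :=
  if dk = 1 then (PySem.List.pyRange 0 k 1).reverse else PySem.List.pyRange 0 k 1

-- one sweep of the 'straight' phase for direction d
def pvSweepS (grid : List (List Int)) (n m d : Int)
    (sd : PySem.Dict (Int × Int × Int) Int) : PySem.Dict (Int × Int × Int) Int :=
  let dd := pvDirB d
  (pvOrder n dd.1).foldl (fun sd r =>
    (pvOrder m dd.2).foldl (fun sd c =>
      let need : Int := if pvCell grid r c = 2 then 0 else 2
      let nr := r + dd.1
      let nc := c + dd.2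
      if 0 ≤ nr ∧ nr < n ∧ 0 ≤ nc ∧ nc < m ∧ pvCell grid nr nc = need then
        sd.insert (d, r, c) (1 + sd.getD (d, nr, nc) 0)
      else
        sd.insert (d, r, c) 0) sd) sd

-- one sweep of the 'bent' phase for direction d (reads the finished 'straight' table sd)
def pvSweepB (grid : List (List Int)) (n m d : Int)
    (sd bd : PySem.Dict (Int × Int × Int) Int) : PySem.Dict (Int × Int × Int) Int :=
  let dd := pvDirB d
  let nd := PySem.Int.mod (d + 1) 4
  let td := pvDirB nd
  (pvOrder n dd.1).foldl (fun bd r =>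
    (pvOrder m dd.2).foldl (fun bd c =>
      let need : Int := if pvCell grid r c = 2 then 0 else 2
      let best : Int := 0
      let nr := r + dd.1
      let nc := c + dd.2
      let best :=
        if 0 ≤ nr ∧ nr < n ∧ 0 ≤ nc ∧ nc < m ∧ pvCell grid nr nc = need then
          1 + bd.getD (d, nr, nc) 0
        else best
      let tr := r + td.1
      let tc := c + td.2
      let best :=
        if 0 ≤ tr ∧ tr < n ∧ 0 ≤ tc ∧ tc < m ∧ pvCell grid tr tc = need then
          max best (1 + sd.getD (nd, tr, tc) 0)
        else best
      bd.insert (d, r, c) best) bd) bd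

def longestVPath_alt (grid : List (List Int)) : Int :=
  let n : Int := PySem.List.len grid
  let m : Int := PySem.List.len (PySem.List.pyGetD grid 0 [])
  let sd := (PySem.List.pyRange 0 4 1).foldl (fun sd d => pvSweepS grid n m d sd) PySem.Dict.empty
  let bd := (PySem.List.pyRange 0 4 1).foldl (fun bd d => pvSweepB grid n m d sd bd) PySem.Dict.empty
  (PySem.List.pyRange 0 n 1).foldl (fun ans i =>
    (PySem.List.pyRange 0 m 1).foldl (fun ans j =>
      if pvCell grid i j = 1 then
        (PySem.List.pyRange 0 4 1).foldl (fun ans d =>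
          max ans (1 + bd.getD (d, i, j) 0)) ans
      else ans) ans) 0

-- ===== PRECONDITION & SPEC =====
-- A raises IndexError exactly on the empty grid (grid[0]) and on grids with a row shorter than
-- the first row (both programs read grid[i][j] for every j < len(grid[0])); Pre_ excludes exactly those.
def Pre_longestVPath (grid : List (List Int)) : Prop :=
  grid ≠ [] ∧ ∀ row ∈ grid, (grid.headD []).length ≤ row.length
instance (grid : List (List Int)) : Decidable (Pre_longestVPath grid) := by
  unfold Pre_longestVPath; infer_instance
def pvWitness_longestVPath : List (List Int) := [[1, 2], [2, 0]]
def Spec_longestVPath (grid : List (List Int)) (out : Int) : Prop := out = longestVPath_alt grid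
instance (grid : List (List Int)) (out : Int) : Decidable (Spec_longestVPath grid out) := by
  unfold Spec_longestVPath; infer_instance

-- ===== CLAIM (what is proved, stated in full; the proofs are below) =====
def Claim_equal_longestVPath : Prop := ∀ (grid : List (List Int)), Dom_longestVPath grid → Pre_longestVPath grid → Spec_longestVPath grid (longestVPath grid)

-- ===== LEMMAS AND PROOFS =====

-- trivial bridges between the two ports' private helpers
lemma pvCell_eq (grid : List (List Int)) (r c : Int) : pvCell grid r c = pvAt grid r c := rfl
lemma pvDirB_eq (d : Int) : pvDirB d = pvDir d := rfl

-- pvE: the common mathematical value both programs compute — the number of extra steps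
-- available from (r,c) heading d with 'turn' consumed or not (fuel-guarded recursion).
def pvE (grid : List (List Int)) (n m : Int) : Nat → Int → Int → Int → Bool → Int
  | 0, _, _, _, _ => 0
  | fuel + 1, r, c, d, turn =>
    let need : Int := if pvAt grid r c = 2 then 0 else 2
    let s : Int :=
      if 0 ≤ r + (pvDir d).1 ∧ r + (pvDir d).1 < n ∧ 0 ≤ c + (pvDir d).2 ∧ c + (pvDir d).2 < m ∧
         pvAt grid (r + (pvDir d).1) (c + (pvDir d).2) = need then
        1 + pvE grid n m fuel (r + (pvDir d).1) (c + (pvDir d).2) d turn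
      else 0
    match turn with
    | true => s
    | false =>
      if 0 ≤ r + (pvDir (pvClockwise d)).1 ∧ r + (pvDir (pvClockwise d)).1 < n ∧
         0 ≤ c + (pvDir (pvClockwise d)).2 ∧ c + (pvDir (pvClockwise d)).2 < m ∧
         pvAt grid (r + (pvDir (pvClockwise d)).1) (c + (pvDir (pvClockwise d)).2) = need then
        max s (1 + pvE grid n m fuel (r + (pvDir (pvClockwise d)).1) (c + (pvDir (pvClockwise d)).2) (pvClockwise d) true)
      else s

-- a bound on the number of steps any path from (r,c) heading d can still make
def pvCap (n m r c d : Int) (turn : Bool) : Int :=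
  if turn then
    (if d = 0 then m - 1 - c else if d = 1 then n - 1 - r else if d = 2 then c else r)
  else
    (if d = 0 then n - 1 - r else if d = 1 then c else if d = 2 then r else m - 1 - c)

lemma pvCap_nonneg (n m r c d : Int) (turn : Bool) (hr : 0 ≤ r) (hrn : r < n)
    (hc : 0 ≤ c) (hcm : c < m) : 0 ≤ pvCap n m r c d turn := by
  unfold pvCap; split_ifs <;> omega

lemma pvClockwise_range (d : Int) (h0 : 0 ≤ d) (h4 : d < 4) :
    0 ≤ pvClockwise d ∧ pvClockwise d < 4 := by
  unfold pvClockwise; split_ifs <;> omega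

lemma pvCap_straight (n m r c d : Int) (turn : Bool) (h0 : 0 ≤ d) (h4 : d < 4) :
    pvCap n m (r + (pvDir d).1) (c + (pvDir d).2) d turn = pvCap n m r c d turn - 1 := by
  interval_cases d <;> cases turn <;> simp [pvCap, pvDir] <;> ring

lemma pvCap_turn (n m r c d : Int) (h0 : 0 ≤ d) (h4 : d < 4) :
    pvCap n m (r + (pvDir (pvClockwise d)).1) (c + (pvDir (pvClockwise d)).2) (pvClockwise d) true
      = pvCap n m r c d false - 1 := by
  interval_cases d <;> simp [pvCap, pvDir, pvClockwise] <;> ring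

lemma pvE_stable (grid : List (List Int)) (n m : Int) :
    ∀ (f1 f2 : Nat) (r c d : Int) (turn : Bool),
      0 ≤ r → r < n → 0 ≤ c → c < m → 0 ≤ d → d < 4 →
      pvCap n m r c d turn < (f1 : Int) → pvCap n m r c d turn < (f2 : Int) →
      pvE grid n m f1 r c d turn = pvE grid n m f2 r c d turn := by
  intro f1
  induction f1 with
  | zero =>
    intro f2 r c d turn hr hrn hc hcm h0 h4 h1 h2
    have := pvCap_nonneg n m r c d turn hr hrn hc hcm
    omega
  | succ f1 ih =>
    intro f2 r c d turn hr hrn hc hcm h0 h4 h1 h2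
    have hcap0 := pvCap_nonneg n m r c d turn hr hrn hc hcm
    cases f2 with
    | zero => omega
    | succ f2 =>
      have hcw := pvClockwise_range d h0 h4
      have hct := pvCap_turn n m r c d h0 h4
      cases turn with
      | true =>
        have hcs := pvCap_straight n m r c d true h0 h4
        simp only [pvE]
        split_ifs
        all_goals
          try rw [ih f2 (r + (pvDir d).1) (c + (pvDir d).2) d true (by omega) (by omega)
            (by omega) (by omega) h0 h4 (by omega) (by omega)]
        all_goals rfl
      | false =>
        have hcs := pvCap_straight n m r c d false h0 h4
        simp only [pvE]
        split_ifs
        all_goals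
          try rw [ih f2 (r + (pvDir d).1) (c + (pvDir d).2) d false (by omega) (by omega)
            (by omega) (by omega) h0 h4 (by omega) (by omega)]
        all_goals
          try rw [ih f2 (r + (pvDir (pvClockwise d)).1) (c + (pvDir (pvClockwise d)).2)
            (pvClockwise d) true (by omega) (by omega) (by omega) (by omega) hcw.1 hcw.2
            (by omega) (by omega)]
        all_goals rfl

-- the fixpoint equations pvE satisfies once the fuel exceeds the cap
lemma pvE_fix_true (grid : List (List Int)) (n m : Int) (F : Nat) (r c d : Int)
    (hr : 0 ≤ r) (hrn : r < n) (hc : 0 ≤ c) (hcm : c < m) (h0 : 0 ≤ d) (h4 : d < 4)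
    (hF : pvCap n m r c d true < (F : Int)) :
    pvE grid n m F r c d true =
      (if 0 ≤ r + (pvDir d).1 ∧ r + (pvDir d).1 < n ∧ 0 ≤ c + (pvDir d).2 ∧ c + (pvDir d).2 < m ∧
          pvAt grid (r + (pvDir d).1) (c + (pvDir d).2) = (if pvAt grid r c = 2 then 0 else 2) then
        1 + pvE grid n m F (r + (pvDir d).1) (c + (pvDir d).2) d true
      else 0) := by
  have hcap0 := pvCap_nonneg n m r c d true hr hrn hc hcm
  cases F with
  | zero => omega
  | succ F =>
    have hcs := pvCap_straight n m r c d true h0 h4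
    have e1 : pvE grid n m (F + 1) r c d true =
        (if 0 ≤ r + (pvDir d).1 ∧ r + (pvDir d).1 < n ∧ 0 ≤ c + (pvDir d).2 ∧ c + (pvDir d).2 < m ∧
            pvAt grid (r + (pvDir d).1) (c + (pvDir d).2) = (if pvAt grid r c = 2 then 0 else 2) then
          1 + pvE grid n m F (r + (pvDir d).1) (c + (pvDir d).2) d true
        else 0) := by
      simp only [pvE]
    rw [e1]
    split_ifs
    all_goals
      try rw [pvE_stable grid n m F (F + 1) (r + (pvDir d).1) (c + (pvDir d).2) d true
        (by omega) (by omega) (by omega) (by omega) h0 h4 (by omega) (by omega)]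
    all_goals rfl

lemma pvE_fix_false (grid : List (List Int)) (n m : Int) (F : Nat) (r c d : Int)
    (hr : 0 ≤ r) (hrn : r < n) (hc : 0 ≤ c) (hcm : c < m) (h0 : 0 ≤ d) (h4 : d < 4)
    (hF : pvCap n m r c d false < (F : Int)) :
    pvE grid n m F r c d false =
      (if 0 ≤ r + (pvDir (pvClockwise d)).1 ∧ r + (pvDir (pvClockwise d)).1 < n ∧
          0 ≤ c + (pvDir (pvClockwise d)).2 ∧ c + (pvDir (pvClockwise d)).2 < m ∧
          pvAt grid (r + (pvDir (pvClockwise d)).1) (c + (pvDir (pvClockwise d)).2) =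
            (if pvAt grid r c = 2 then 0 else 2) then
         max (if 0 ≤ r + (pvDir d).1 ∧ r + (pvDir d).1 < n ∧ 0 ≤ c + (pvDir d).2 ∧ c + (pvDir d).2 < m ∧
                 pvAt grid (r + (pvDir d).1) (c + (pvDir d).2) = (if pvAt grid r c = 2 then 0 else 2) then
               1 + pvE grid n m F (r + (pvDir d).1) (c + (pvDir d).2) d false
             else 0)
           (1 + pvE grid n m F (r + (pvDir (pvClockwise d)).1) (c + (pvDir (pvClockwise d)).2) (pvClockwise d) true)
       else
         (if 0 ≤ r + (pvDir d).1 ∧ r + (pvDir d).1 < n ∧ 0 ≤ c + (pvDir d).2 ∧ c + (pvDir d).2 < m ∧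
             pvAt grid (r + (pvDir d).1) (c + (pvDir d).2) = (if pvAt grid r c = 2 then 0 else 2) then
            1 + pvE grid n m F (r + (pvDir d).1) (c + (pvDir d).2) d false
          else 0)) := by
  have hcap0 := pvCap_nonneg n m r c d false hr hrn hc hcm
  cases F with
  | zero => omega
  | succ F =>
    have hcs := pvCap_straight n m r c d false h0 h4
    have hct := pvCap_turn n m r c d h0 h4
    have hcw := pvClockwise_range d h0 h4
    have e1 : pvE grid n m (F + 1) r c d false =
        (if 0 ≤ r + (pvDir (pvClockwise d)).1 ∧ r + (pvDir (pvClockwise d)).1 < n ∧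
            0 ≤ c + (pvDir (pvClockwise d)).2 ∧ c + (pvDir (pvClockwise d)).2 < m ∧
            pvAt grid (r + (pvDir (pvClockwise d)).1) (c + (pvDir (pvClockwise d)).2) =
              (if pvAt grid r c = 2 then 0 else 2) then
          max (if 0 ≤ r + (pvDir d).1 ∧ r + (pvDir d).1 < n ∧ 0 ≤ c + (pvDir d).2 ∧ c + (pvDir d).2 < m ∧
                  pvAt grid (r + (pvDir d).1) (c + (pvDir d).2) = (if pvAt grid r c = 2 then 0 else 2) then
                1 + pvE grid n m F (r + (pvDir d).1) (c + (pvDir d).2) d false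
              else 0)
            (1 + pvE grid n m F (r + (pvDir (pvClockwise d)).1) (c + (pvDir (pvClockwise d)).2) (pvClockwise d) true)
        else
          (if 0 ≤ r + (pvDir d).1 ∧ r + (pvDir d).1 < n ∧ 0 ≤ c + (pvDir d).2 ∧ c + (pvDir d).2 < m ∧
              pvAt grid (r + (pvDir d).1) (c + (pvDir d).2) = (if pvAt grid r c = 2 then 0 else 2) then
             1 + pvE grid n m F (r + (pvDir d).1) (c + (pvDir d).2) d false
           else 0)) := by
      simp only [pvE]
    rw [e1]
    split_ifs
    all_goals
      try rw [pvE_stable grid n m F (F + 1) (r + (pvDir d).1) (c + (pvDir d).2) d false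
        (by omega) (by omega) (by omega) (by omega) h0 h4 (by omega) (by omega)]
    all_goals
      try rw [pvE_stable grid n m F (F + 1) (r + (pvDir (pvClockwise d)).1)
        (c + (pvDir (pvClockwise d)).2) (pvClockwise d) true
        (by omega) (by omega) (by omega) (by omega) hcw.1 hcw.2 (by omega) (by omega)]
    all_goals rfl

lemma pvExpected_succ (k : Int) (hk : 1 ≤ k) :
    pvExpected (k + 1) = (if pvExpected k = 2 then 0 else 2) := by
  unfold pvExpected
  rcases eq_or_lt_of_le hk with h1 | h1
  · simp [← h1, PySem.Int.mod]
  · have e1 : PySem.Int.mod k 2 = k % 2 := PySem.Int.mod_eq_emod_of_pos (by omega)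
    have e2 : PySem.Int.mod (k + 1) 2 = (k + 1) % 2 := PySem.Int.mod_eq_emod_of_pos (by omega)
    rw [e1, e2]
    split_ifs <;> omega

lemma pvE_nonneg (grid : List (List Int)) (n m : Int) :
    ∀ (fuel : Nat) (r c d : Int) (turn : Bool), 0 ≤ pvE grid n m fuel r c d turn := by
  intro fuel
  induction fuel with
  | zero => intro r c d turn; simp [pvE]
  | succ fuel ih =>
    intro r c d turn
    cases turn with
    | true =>
      have hs := ih (r + (pvDir d).1) (c + (pvDir d).2) d true
      simp only [pvE]
      split_ifs <;> omega
    | false =>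
      have hs := ih (r + (pvDir d).1) (c + (pvDir d).2) d false
      have ht := ih (r + (pvDir (pvClockwise d)).1) (c + (pvDir (pvClockwise d)).2) (pvClockwise d) true
      simp only [pvE]
      split_ifs <;> (try simp only [le_max_iff]) <;> omega

-- A's dfs returns k plus the number of extra steps
lemma dfs_eq_E (grid : List (List Int)) (n m : Int) :
    ∀ (fuel : Nat) (r c d : Int) (turn : Bool) (k : Int),
      0 ≤ d → d < 4 → 1 ≤ k → pvAt grid r c = pvExpected k →
      pvDfsA grid n m fuel r c d turn k = k + pvE grid n m fuel r c d turn := by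
  intro fuel
  induction fuel with
  | zero => intro r c d turn k _ _ _ _; simp [pvDfsA, pvE]
  | succ fuel ih =>
    intro r c d turn k hd0 hd4 hk hinv
    have hneed : (if pvAt grid r c = 2 then (0 : Int) else 2) = pvExpected (k + 1) := by
      rw [pvExpected_succ k hk, hinv]
    have hndrange := pvClockwise_range d hd0 hd4
    have e1 := pvE_nonneg grid n m fuel (r + (pvDir d).1) (c + (pvDir d).2) d turn
    have e2 := pvE_nonneg grid n m fuel (r + (pvDir (pvClockwise d)).1)
      (c + (pvDir (pvClockwise d)).2) (pvClockwise d) true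
    cases turn with
    | true =>
      simp only [pvDfsA, pvE, hneed, Bool.true_eq_false, if_false]
      split_ifs
      all_goals
        try rw [ih (r + (pvDir d).1) (c + (pvDir d).2) d true (k + 1) hd0 hd4 (by omega) (by tauto)]
      all_goals omega
    | false =>
      simp only [pvDfsA, pvE, hneed, if_true]
      split_ifs
      all_goals
        try rw [ih (r + (pvDir d).1) (c + (pvDir d).2) d false (k + 1) hd0 hd4 (by omega) (by tauto)]
      all_goals
        try rw [ih (r + (pvDir (pvClockwise d)).1) (c + (pvDir (pvClockwise d)).2)
          (pvClockwise d) true (k + 1) hndrange.1 hndrange.2 (by omega) (by tauto)]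
      all_goals omega

lemma mem_pvOrder (k dk x : Int) : x ∈ pvOrder k dk ↔ 0 ≤ x ∧ x < k := by
  unfold pvOrder; split_ifs <;> simp [PySem.List.mem_pyRange_one]

lemma pvOrder_ord (k dk : Int) (hdk : dk = 1 ∨ dk = -1) :
    ∀ p r s, pvOrder k dk = p ++ r :: s → r + dk ∉ r :: s := by
  intro p r s h
  have hpw : (p ++ r :: s).Pairwise (fun a b : Int => b ≠ a + dk) := by
    rw [← h]
    unfold pvOrder
    rcases hdk with h1 | h1 <;> subst h1
    · rw [if_pos rfl, List.pairwise_reverse]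
      exact (PySem.List.pairwise_lt_pyRange_one 0 k).imp (by intro a b hab; omega)
    · rw [if_neg (by norm_num)]
      exact (PySem.List.pairwise_lt_pyRange_one 0 k).imp (by intro a b hab; omega)
  have h2 : (r :: s).Pairwise (fun a b : Int => b ≠ a + dk) :=
    hpw.sublist (List.sublist_append_right p (r :: s))
  intro hmem
  rcases List.mem_cons.mp hmem with hm | hm
  · rcases hdk with h1 | h1 <;> omega
  · exact (List.pairwise_cons.mp h2).1 (r + dk) hm rfl

-- the straight sweep computes pvE · · d true on every in-range key (d, r, c) and
-- leaves every other key unchanged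
lemma sweepS_getD (grid : List (List Int)) (n m : Int) (F : Nat) (d : Int)
    (h0 : 0 ≤ d) (h4 : d < 4)
    (hcap : ∀ r c d' turn, 0 ≤ r → r < n → 0 ≤ c → c < m → 0 ≤ d' → d' < 4 →
      pvCap n m r c d' turn < (F : Int))
    (sd : PySem.Dict (Int × Int × Int) Int) (d' r' c' : Int) :
    (pvSweepS grid n m d sd).getD (d', r', c') 0 =
      if d' = d ∧ 0 ≤ r' ∧ r' < n ∧ 0 ≤ c' ∧ c' < m then pvE grid n m F r' c' d true
      else sd.getD (d', r', c') 0 := by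
  have hdr : (pvDir d).1 = 1 ∨ (pvDir d).1 = -1 := by unfold pvDir; split_ifs <;> simp
  simp only [pvSweepS, pvCell_eq, pvDirB_eq]
  -- one row: the column pass writes exactly row r of plane d, reading only row r + dr
  have colS : ∀ (cs : List Int), (∀ x ∈ cs, 0 ≤ x ∧ x < m) →
      ∀ (r : Int), 0 ≤ r → r < n →
      ∀ (sd : PySem.Dict (Int × Int × Int) Int),
      (∀ c', 0 ≤ c' → c' < m → 0 ≤ r + (pvDir d).1 → r + (pvDir d).1 < n →
        sd.getD (d, r + (pvDir d).1, c') 0 = pvE grid n m F (r + (pvDir d).1) c' d true) →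
      ∀ d' r' c',
        (cs.foldl (fun sd c =>
          if 0 ≤ r + (pvDir d).1 ∧ r + (pvDir d).1 < n ∧ 0 ≤ c + (pvDir d).2 ∧ c + (pvDir d).2 < m ∧
             pvAt grid (r + (pvDir d).1) (c + (pvDir d).2) = (if pvAt grid r c = 2 then 0 else 2) then
            sd.insert (d, r, c) (1 + sd.getD (d, r + (pvDir d).1, c + (pvDir d).2) 0)
          else sd.insert (d, r, c) 0) sd).getD (d', r', c') 0 =
        if d' = d ∧ r' = r ∧ c' ∈ cs then pvE grid n m F r' c' d true
        else sd.getD (d', r', c') 0 := by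
    intro cs
    induction cs with
    | nil => intro _ r _ _ sd _ d' r' c'; simp
    | cons c cs ih =>
      intro hcs r hr hrn sd hprev d' r' c'
      have hcm' := hcs c (List.mem_cons_self)
      have hrne : r + (pvDir d).1 ≠ r := by rcases hdr with hD | hD <;> rw [hD] <;> omega
      simp only [List.foldl_cons]
      have hval :
          (if 0 ≤ r + (pvDir d).1 ∧ r + (pvDir d).1 < n ∧ 0 ≤ c + (pvDir d).2 ∧ c + (pvDir d).2 < m ∧
               pvAt grid (r + (pvDir d).1) (c + (pvDir d).2) = (if pvAt grid r c = 2 then 0 else 2) then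
             1 + sd.getD (d, r + (pvDir d).1, c + (pvDir d).2) 0
           else (0 : Int)) = pvE grid n m F r c d true := by
        rw [pvE_fix_true grid n m F r c d hr hrn hcm'.1 hcm'.2 h0 h4
          (hcap r c d true hr hrn hcm'.1 hcm'.2 h0 h4)]
        split_ifs <;> try rfl
        all_goals
          rename_i hgg
          rw [hprev (c + (pvDir d).2) (by omega) (by omega) (by omega) (by omega)]
      have hstepv : ∀ (k : Int × Int × Int),
          ((if 0 ≤ r + (pvDir d).1 ∧ r + (pvDir d).1 < n ∧ 0 ≤ c + (pvDir d).2 ∧ c + (pvDir d).2 < m ∧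
               pvAt grid (r + (pvDir d).1) (c + (pvDir d).2) = (if pvAt grid r c = 2 then 0 else 2) then
              sd.insert (d, r, c) (1 + sd.getD (d, r + (pvDir d).1, c + (pvDir d).2) 0)
            else sd.insert (d, r, c) 0) : PySem.Dict (Int × Int × Int) Int).getD k 0 =
          if k = (d, r, c) then pvE grid n m F r c d true else sd.getD k 0 := by
        intro k
        rw [← hval]
        split_ifs <;> rw [PySem.Dict.getD_insert] <;>
          first
            | rw [if_pos ‹k = (d, r, c)›]
            | rw [if_neg ‹¬ k = (d, r, c)›]
      rw [ih (fun x hx => hcs x (List.mem_cons_of_mem c hx)) r hr hrn _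
        (fun c0 h1 h2 h3 h4' => by
          rw [hstepv, if_neg (by intro h; rw [Prod.ext_iff, Prod.ext_iff] at h; exact hrne h.2.1),
            hprev c0 h1 h2 h3 h4']),
        hstepv (d', r', c')]
      by_cases e1 : d' = d
      · by_cases e2 : r' = r
        · subst e1; subst e2
          by_cases e3 : c' ∈ cs
          · rw [if_pos ⟨rfl, rfl, e3⟩, if_pos ⟨rfl, rfl, List.mem_cons_of_mem c e3⟩]
          · rw [if_neg (by simp [e3])]
            by_cases e4 : c' = c
            · subst e4
              rw [if_pos rfl, if_pos ⟨rfl, rfl, List.mem_cons_self⟩]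
            · rw [if_neg (by intro h; rw [Prod.ext_iff, Prod.ext_iff] at h; exact e4 h.2.2),
                if_neg (by rintro ⟨-, -, h⟩; rcases List.mem_cons.mp h with h | h
                           · exact e4 h
                           · exact e3 h)]
        · rw [if_neg (by simp [e2]), if_neg (by intro h; rw [Prod.ext_iff, Prod.ext_iff] at h; exact e2 h.2.1),
            if_neg (by simp [e2])]
      · rw [if_neg (by simp [e1]), if_neg (by intro h; rw [Prod.ext_iff, Prod.ext_iff] at h; exact e1 h.1),
          if_neg (by simp [e1])]
  -- the row pass, processed in dependency order
  have rowS : ∀ (rs : List Int), (∀ r ∈ rs, 0 ≤ r ∧ r < n) →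
      (∀ p r s, rs = p ++ r :: s → r + (pvDir d).1 ∉ r :: s) →
      ∀ (sd : PySem.Dict (Int × Int × Int) Int),
      (∀ r' c', 0 ≤ r' → r' < n → 0 ≤ c' → c' < m → r' ∉ rs →
        sd.getD (d, r', c') 0 = pvE grid n m F r' c' d true) →
      ∀ d' r' c',
        (rs.foldl (fun sd r => (pvOrder m (pvDir d).2).foldl (fun sd c =>
          if 0 ≤ r + (pvDir d).1 ∧ r + (pvDir d).1 < n ∧ 0 ≤ c + (pvDir d).2 ∧ c + (pvDir d).2 < m ∧
             pvAt grid (r + (pvDir d).1) (c + (pvDir d).2) = (if pvAt grid r c = 2 then 0 else 2) then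
            sd.insert (d, r, c) (1 + sd.getD (d, r + (pvDir d).1, c + (pvDir d).2) 0)
          else sd.insert (d, r, c) 0) sd) sd).getD (d', r', c') 0 =
        if d' = d ∧ r' ∈ rs ∧ 0 ≤ c' ∧ c' < m then pvE grid n m F r' c' d true
        else sd.getD (d', r', c') 0 := by
    intro rs
    induction rs with
    | nil => intro _ _ sd _ d' r' c'; simp
    | cons r rs ih =>
      intro hin hord sd hdone d' r' c'
      have hrr := hin r List.mem_cons_self
      have hself := hord [] r rs rfl
      have hstep := colS (pvOrder m (pvDir d).2)
        (fun x hx => (mem_pvOrder m (pvDir d).2 x).mp hx) r hrr.1 hrr.2 sd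
        (fun c0 h1 h2 h3 h4' => hdone (r + (pvDir d).1) c0 h3 h4' h1 h2 hself)
      simp only [List.foldl_cons]
      rw [ih (fun x hx => hin x (List.mem_cons_of_mem r hx))
        (fun p r0 s0 hsplit => hord (r :: p) r0 s0 (by rw [hsplit]; rfl)) _
        (fun r0 c0 h1 h2 h3 h4' hnot => by
          rw [hstep d r0 c0]
          by_cases e : r0 = r
          · subst e
            rw [if_pos ⟨rfl, rfl, (mem_pvOrder m (pvDir d).2 c0).mpr ⟨h3, h4'⟩⟩]
          · rw [if_neg (by simp [e])]
            exact hdone r0 c0 h1 h2 h3 h4' (by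
              intro hmem
              rcases List.mem_cons.mp hmem with h | h
              · exact e h
              · exact hnot h)),
        hstep d' r' c']
      by_cases e1 : d' = d
      · by_cases e3 : 0 ≤ c' ∧ c' < m
        · by_cases e2 : r' ∈ rs
          · rw [if_pos ⟨e1, e2, e3.1, e3.2⟩, if_pos ⟨e1, List.mem_cons_of_mem r e2, e3.1, e3.2⟩]
          · rw [if_neg (fun h => e2 h.2.1)]
            by_cases e4 : r' = r
            · rw [if_pos ⟨e1, e4, (mem_pvOrder m (pvDir d).2 c').mpr e3⟩,
                if_pos ⟨e1, by rw [e4]; exact List.mem_cons_self, e3.1, e3.2⟩]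
            · rw [if_neg (fun h => e4 h.2.1),
                if_neg (by rintro ⟨-, h, -⟩; rcases List.mem_cons.mp h with h | h
                           · exact e4 h
                           · exact e2 h)]
        · rw [if_neg (fun h => e3 ⟨h.2.2.1, h.2.2.2⟩),
            if_neg (fun h => e3 ⟨((mem_pvOrder m (pvDir d).2 c').mp h.2.2).1,
              ((mem_pvOrder m (pvDir d).2 c').mp h.2.2).2⟩),
            if_neg (fun h => e3 ⟨h.2.2.1, h.2.2.2⟩)]
      · rw [if_neg (fun h => e1 h.1), if_neg (fun h => e1 h.1), if_neg (fun h => e1 h.1)]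
  refine (rowS (pvOrder n (pvDir d).1)
    (fun x hx => (mem_pvOrder n (pvDir d).1 x).mp hx)
    (pvOrder_ord n (pvDir d).1 hdr) sd
    (fun r0 c0 h1 h2 _ _ hnot => absurd ((mem_pvOrder n (pvDir d).1 r0).mpr ⟨h1, h2⟩) hnot)
    d' r' c').trans ?_
  by_cases e1 : d' = d ∧ 0 ≤ r' ∧ r' < n ∧ 0 ≤ c' ∧ c' < m
  · rw [if_pos ⟨e1.1, (mem_pvOrder n (pvDir d).1 r').mpr ⟨e1.2.1, e1.2.2.1⟩, e1.2.2.2⟩,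
      if_pos e1]
  · rw [if_neg (by
      rintro ⟨ha, hb, hc', hd'⟩
      exact e1 ⟨ha, ((mem_pvOrder n (pvDir d).1 r').mp hb).1,
        ((mem_pvOrder n (pvDir d).1 r').mp hb).2, hc', hd'⟩), if_neg e1]

lemma sweepB_getD (grid : List (List Int)) (n m : Int) (F : Nat) (d : Int)
    (h0 : 0 ≤ d) (h4 : d < 4)
    (hcap : ∀ r c d' turn, 0 ≤ r → r < n → 0 ≤ c → c < m → 0 ≤ d' → d' < 4 →
      pvCap n m r c d' turn < (F : Int))
    (sd : PySem.Dict (Int × Int × Int) Int)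
    (hsd : ∀ r c, 0 ≤ r → r < n → 0 ≤ c → c < m →
      sd.getD (PySem.Int.mod (d + 1) 4, r, c) 0 = pvE grid n m F r c (pvClockwise d) true)
    (bd : PySem.Dict (Int × Int × Int) Int) (d' r' c' : Int) :
    (pvSweepB grid n m d sd bd).getD (d', r', c') 0 =
      if d' = d ∧ 0 ≤ r' ∧ r' < n ∧ 0 ≤ c' ∧ c' < m then pvE grid n m F r' c' d false
      else bd.getD (d', r', c') 0 := by
  have hdr : (pvDir d).1 = 1 ∨ (pvDir d).1 = -1 := by unfold pvDir; split_ifs <;> simp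
  have hmod : PySem.Int.mod (d + 1) 4 = pvClockwise d := by interval_cases d <;> decide
  have hcw := pvClockwise_range d h0 h4
  rw [hmod] at hsd
  simp only [pvSweepB, pvCell_eq, pvDirB_eq, hmod]
  have colB : ∀ (cs : List Int), (∀ x ∈ cs, 0 ≤ x ∧ x < m) →
      ∀ (r : Int), 0 ≤ r → r < n →
      ∀ (bd : PySem.Dict (Int × Int × Int) Int),
      (∀ c', 0 ≤ c' → c' < m → 0 ≤ r + (pvDir d).1 → r + (pvDir d).1 < n →
        bd.getD (d, r + (pvDir d).1, c') 0 = pvE grid n m F (r + (pvDir d).1) c' d false) →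
      ∀ d' r' c',
        (cs.foldl (fun bd c =>
          bd.insert (d, r, c)
            (if 0 ≤ r + (pvDir (pvClockwise d)).1 ∧ r + (pvDir (pvClockwise d)).1 < n ∧
                0 ≤ c + (pvDir (pvClockwise d)).2 ∧ c + (pvDir (pvClockwise d)).2 < m ∧
                pvAt grid (r + (pvDir (pvClockwise d)).1) (c + (pvDir (pvClockwise d)).2) =
                  (if pvAt grid r c = 2 then 0 else 2) then
               max (if 0 ≤ r + (pvDir d).1 ∧ r + (pvDir d).1 < n ∧ 0 ≤ c + (pvDir d).2 ∧ c + (pvDir d).2 < m ∧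
                       pvAt grid (r + (pvDir d).1) (c + (pvDir d).2) = (if pvAt grid r c = 2 then 0 else 2) then
                     1 + bd.getD (d, r + (pvDir d).1, c + (pvDir d).2) 0
                   else 0)
                 (1 + sd.getD (pvClockwise d, r + (pvDir (pvClockwise d)).1, c + (pvDir (pvClockwise d)).2) 0)
             else
               (if 0 ≤ r + (pvDir d).1 ∧ r + (pvDir d).1 < n ∧ 0 ≤ c + (pvDir d).2 ∧ c + (pvDir d).2 < m ∧
                   pvAt grid (r + (pvDir d).1) (c + (pvDir d).2) = (if pvAt grid r c = 2 then 0 else 2) then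
                  1 + bd.getD (d, r + (pvDir d).1, c + (pvDir d).2) 0
                else 0))) bd).getD (d', r', c') 0 =
        if d' = d ∧ r' = r ∧ c' ∈ cs then pvE grid n m F r' c' d false
        else bd.getD (d', r', c') 0 := by
    intro cs
    induction cs with
    | nil => intro _ r _ _ bd _ d' r' c'; simp
    | cons c cs ih =>
      intro hcs r hr hrn bd hprev d' r' c'
      have hcm' := hcs c (List.mem_cons_self)
      have hrne : r + (pvDir d).1 ≠ r := by rcases hdr with hD | hD <;> rw [hD] <;> omega
      simp only [List.foldl_cons]
      have hval :
          (if 0 ≤ r + (pvDir (pvClockwise d)).1 ∧ r + (pvDir (pvClockwise d)).1 < n ∧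
              0 ≤ c + (pvDir (pvClockwise d)).2 ∧ c + (pvDir (pvClockwise d)).2 < m ∧
              pvAt grid (r + (pvDir (pvClockwise d)).1) (c + (pvDir (pvClockwise d)).2) =
                (if pvAt grid r c = 2 then 0 else 2) then
             max (if 0 ≤ r + (pvDir d).1 ∧ r + (pvDir d).1 < n ∧ 0 ≤ c + (pvDir d).2 ∧ c + (pvDir d).2 < m ∧
                     pvAt grid (r + (pvDir d).1) (c + (pvDir d).2) = (if pvAt grid r c = 2 then 0 else 2) then
                   1 + bd.getD (d, r + (pvDir d).1, c + (pvDir d).2) 0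
                 else 0)
               (1 + sd.getD (pvClockwise d, r + (pvDir (pvClockwise d)).1, c + (pvDir (pvClockwise d)).2) 0)
           else
             (if 0 ≤ r + (pvDir d).1 ∧ r + (pvDir d).1 < n ∧ 0 ≤ c + (pvDir d).2 ∧ c + (pvDir d).2 < m ∧
                 pvAt grid (r + (pvDir d).1) (c + (pvDir d).2) = (if pvAt grid r c = 2 then 0 else 2) then
                1 + bd.getD (d, r + (pvDir d).1, c + (pvDir d).2) 0
              else 0)) = pvE grid n m F r c d false := by
        rw [pvE_fix_false grid n m F r c d hr hrn hcm'.1 hcm'.2 h0 h4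
          (hcap r c d false hr hrn hcm'.1 hcm'.2 h0 h4)]
        split_ifs <;> try rfl
        all_goals
          try rw [hprev (c + (pvDir d).2) (by omega) (by omega) (by omega) (by omega)]
        all_goals
          try rw [hsd (r + (pvDir (pvClockwise d)).1) (c + (pvDir (pvClockwise d)).2)
            (by omega) (by omega) (by omega) (by omega)]
      have hstepv : ∀ (k : Int × Int × Int),
          ((bd.insert (d, r, c)
            (if 0 ≤ r + (pvDir (pvClockwise d)).1 ∧ r + (pvDir (pvClockwise d)).1 < n ∧
                0 ≤ c + (pvDir (pvClockwise d)).2 ∧ c + (pvDir (pvClockwise d)).2 < m ∧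
                pvAt grid (r + (pvDir (pvClockwise d)).1) (c + (pvDir (pvClockwise d)).2) =
                  (if pvAt grid r c = 2 then 0 else 2) then
               max (if 0 ≤ r + (pvDir d).1 ∧ r + (pvDir d).1 < n ∧ 0 ≤ c + (pvDir d).2 ∧ c + (pvDir d).2 < m ∧
                       pvAt grid (r + (pvDir d).1) (c + (pvDir d).2) = (if pvAt grid r c = 2 then 0 else 2) then
                     1 + bd.getD (d, r + (pvDir d).1, c + (pvDir d).2) 0
                   else 0)
                 (1 + sd.getD (pvClockwise d, r + (pvDir (pvClockwise d)).1, c + (pvDir (pvClockwise d)).2) 0)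
             else
               (if 0 ≤ r + (pvDir d).1 ∧ r + (pvDir d).1 < n ∧ 0 ≤ c + (pvDir d).2 ∧ c + (pvDir d).2 < m ∧
                   pvAt grid (r + (pvDir d).1) (c + (pvDir d).2) = (if pvAt grid r c = 2 then 0 else 2) then
                  1 + bd.getD (d, r + (pvDir d).1, c + (pvDir d).2) 0
                else 0))) : PySem.Dict (Int × Int × Int) Int).getD k 0 =
          if k = (d, r, c) then pvE grid n m F r c d false else bd.getD k 0 := by
        intro k
        rw [PySem.Dict.getD_insert, hval]
      rw [ih (fun x hx => hcs x (List.mem_cons_of_mem c hx)) r hr hrn _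
        (fun c0 h1 h2 h3 h4' => by
          rw [hstepv, if_neg (by intro h; rw [Prod.ext_iff, Prod.ext_iff] at h; exact hrne h.2.1),
            hprev c0 h1 h2 h3 h4']),
        hstepv (d', r', c')]
      by_cases e1 : d' = d
      · by_cases e2 : r' = r
        · by_cases e3 : c' ∈ cs
          · rw [if_pos ⟨e1, e2, e3⟩, if_pos ⟨e1, e2, List.mem_cons_of_mem c e3⟩]
          · rw [if_neg (fun h => e3 h.2.2)]
            by_cases e4 : c' = c
            · rw [if_pos (by rw [Prod.ext_iff, Prod.ext_iff]; exact ⟨e1, e2, e4⟩)]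
              rw [e1, e2, e4]
              rw [if_pos ⟨rfl, rfl, List.mem_cons_self⟩]
            · rw [if_neg (by intro h; rw [Prod.ext_iff, Prod.ext_iff] at h; exact e4 h.2.2),
                if_neg (by rintro ⟨-, -, h⟩; rcases List.mem_cons.mp h with h | h
                           · exact e4 h
                           · exact e3 h)]
        · rw [if_neg (fun h => e2 h.2.1),
            if_neg (by intro h; rw [Prod.ext_iff, Prod.ext_iff] at h; exact e2 h.2.1),
            if_neg (fun h => e2 h.2.1)]
      · rw [if_neg (fun h => e1 h.1),
          if_neg (by intro h; rw [Prod.ext_iff, Prod.ext_iff] at h; exact e1 h.1),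
          if_neg (fun h => e1 h.1)]
  have rowB : ∀ (rs : List Int), (∀ r ∈ rs, 0 ≤ r ∧ r < n) →
      (∀ p r s, rs = p ++ r :: s → r + (pvDir d).1 ∉ r :: s) →
      ∀ (bd : PySem.Dict (Int × Int × Int) Int),
      (∀ r' c', 0 ≤ r' → r' < n → 0 ≤ c' → c' < m → r' ∉ rs →
        bd.getD (d, r', c') 0 = pvE grid n m F r' c' d false) →
      ∀ d' r' c',
        (rs.foldl (fun bd r => (pvOrder m (pvDir d).2).foldl (fun bd c =>
          bd.insert (d, r, c)
            (if 0 ≤ r + (pvDir (pvClockwise d)).1 ∧ r + (pvDir (pvClockwise d)).1 < n ∧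
                0 ≤ c + (pvDir (pvClockwise d)).2 ∧ c + (pvDir (pvClockwise d)).2 < m ∧
                pvAt grid (r + (pvDir (pvClockwise d)).1) (c + (pvDir (pvClockwise d)).2) =
                  (if pvAt grid r c = 2 then 0 else 2) then
               max (if 0 ≤ r + (pvDir d).1 ∧ r + (pvDir d).1 < n ∧ 0 ≤ c + (pvDir d).2 ∧ c + (pvDir d).2 < m ∧
                       pvAt grid (r + (pvDir d).1) (c + (pvDir d).2) = (if pvAt grid r c = 2 then 0 else 2) then
                     1 + bd.getD (d, r + (pvDir d).1, c + (pvDir d).2) 0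
                   else 0)
                 (1 + sd.getD (pvClockwise d, r + (pvDir (pvClockwise d)).1, c + (pvDir (pvClockwise d)).2) 0)
             else
               (if 0 ≤ r + (pvDir d).1 ∧ r + (pvDir d).1 < n ∧ 0 ≤ c + (pvDir d).2 ∧ c + (pvDir d).2 < m ∧
                   pvAt grid (r + (pvDir d).1) (c + (pvDir d).2) = (if pvAt grid r c = 2 then 0 else 2) then
                  1 + bd.getD (d, r + (pvDir d).1, c + (pvDir d).2) 0
                else 0))) bd) bd).getD (d', r', c') 0 =
        if d' = d ∧ r' ∈ rs ∧ 0 ≤ c' ∧ c' < m then pvE grid n m F r' c' d false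
        else bd.getD (d', r', c') 0 := by
    intro rs
    induction rs with
    | nil => intro _ _ bd _ d' r' c'; simp
    | cons r rs ih =>
      intro hin hord bd hdone d' r' c'
      have hrr := hin r List.mem_cons_self
      have hself := hord [] r rs rfl
      have hstep := colB (pvOrder m (pvDir d).2)
        (fun x hx => (mem_pvOrder m (pvDir d).2 x).mp hx) r hrr.1 hrr.2 bd
        (fun c0 h1 h2 h3 h4' => hdone (r + (pvDir d).1) c0 h3 h4' h1 h2 hself)
      simp only [List.foldl_cons]
      rw [ih (fun x hx => hin x (List.mem_cons_of_mem r hx))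
        (fun p r0 s0 hsplit => hord (r :: p) r0 s0 (by rw [hsplit]; rfl)) _
        (fun r0 c0 h1 h2 h3 h4' hnot => by
          rw [hstep d r0 c0]
          by_cases e : r0 = r
          · rw [if_pos ⟨rfl, e, (mem_pvOrder m (pvDir d).2 c0).mpr ⟨h3, h4'⟩⟩]
          · rw [if_neg (fun h => e h.2.1)]
            exact hdone r0 c0 h1 h2 h3 h4' (by
              intro hmem
              rcases List.mem_cons.mp hmem with h | h
              · exact e h
              · exact hnot h)),
        hstep d' r' c']
      by_cases e1 : d' = d
      · by_cases e3 : 0 ≤ c' ∧ c' < m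
        · by_cases e2 : r' ∈ rs
          · rw [if_pos ⟨e1, e2, e3.1, e3.2⟩, if_pos ⟨e1, List.mem_cons_of_mem r e2, e3.1, e3.2⟩]
          · rw [if_neg (fun h => e2 h.2.1)]
            by_cases e4 : r' = r
            · rw [if_pos ⟨e1, e4, (mem_pvOrder m (pvDir d).2 c').mpr e3⟩,
                if_pos ⟨e1, by rw [e4]; exact List.mem_cons_self, e3.1, e3.2⟩]
            · rw [if_neg (fun h => e4 h.2.1),
                if_neg (by rintro ⟨-, h, -⟩; rcases List.mem_cons.mp h with h | h
                           · exact e4 h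
                           · exact e2 h)]
        · rw [if_neg (fun h => e3 ⟨h.2.2.1, h.2.2.2⟩),
            if_neg (fun h => e3 ⟨((mem_pvOrder m (pvDir d).2 c').mp h.2.2).1,
              ((mem_pvOrder m (pvDir d).2 c').mp h.2.2).2⟩),
            if_neg (fun h => e3 ⟨h.2.2.1, h.2.2.2⟩)]
      · rw [if_neg (fun h => e1 h.1), if_neg (fun h => e1 h.1), if_neg (fun h => e1 h.1)]
  refine (rowB (pvOrder n (pvDir d).1)
    (fun x hx => (mem_pvOrder n (pvDir d).1 x).mp hx)
    (pvOrder_ord n (pvDir d).1 hdr) bd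
    (fun r0 c0 h1 h2 _ _ hnot => absurd ((mem_pvOrder n (pvDir d).1 r0).mpr ⟨h1, h2⟩) hnot)
    d' r' c').trans ?_
  by_cases e1 : d' = d ∧ 0 ≤ r' ∧ r' < n ∧ 0 ≤ c' ∧ c' < m
  · rw [if_pos ⟨e1.1, (mem_pvOrder n (pvDir d).1 r').mpr ⟨e1.2.1, e1.2.2.1⟩, e1.2.2.2⟩,
      if_pos e1]
  · rw [if_neg (by
      rintro ⟨ha, hb, hc', hd'⟩
      exact e1 ⟨ha, ((mem_pvOrder n (pvDir d).1 r').mp hb).1,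
        ((mem_pvOrder n (pvDir d).1 r').mp hb).2, hc', hd'⟩), if_neg e1]

-- the shared outer scan, with B's table abstracted by its lookup property
lemma finalFold (grid : List (List Int)) (n m : Int) (F : Nat)
    (bd : PySem.Dict (Int × Int × Int) Int)
    (hbd : ∀ d0 i j, 0 ≤ d0 → d0 < 4 → 0 ≤ i → i < n → 0 ≤ j → j < m →
      bd.getD (d0, i, j) 0 = pvE grid n m F i j d0 false) :
    (PySem.List.pyRange 0 n 1).foldl (fun ans i =>
      (PySem.List.pyRange 0 m 1).foldl (fun ans j =>
        if pvAt grid i j = 1 then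
          (PySem.List.pyRange 0 4 1).foldl (fun ans d =>
            max ans (pvDfsA grid n m F i j d false 1)) ans
        else ans) ans) 0 =
    (PySem.List.pyRange 0 n 1).foldl (fun ans i =>
      (PySem.List.pyRange 0 m 1).foldl (fun ans j =>
        if pvAt grid i j = 1 then
          (PySem.List.pyRange 0 4 1).foldl (fun ans d =>
            max ans (1 + bd.getD (d, i, j) 0)) ans
        else ans) ans) 0 := by
  apply PySem.List.foldl_congr_mem
  intro ans i hi
  apply PySem.List.foldl_congr_mem
  intro ans2 j hj
  rw [PySem.List.mem_pyRange_one] at hi hj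
  by_cases hone : pvAt grid i j = 1
  · rw [if_pos hone, if_pos hone]
    apply PySem.List.foldl_congr_mem
    intro ans3 d hd
    rw [PySem.List.mem_pyRange_one] at hd
    rw [dfs_eq_E grid n m F i j d false 1 hd.1 hd.2 le_rfl (by rw [hone]; decide),
      hbd d i j hd.1 hd.2 hi.1 hi.2 hj.1 hj.2]
  · rw [if_neg hone, if_neg hone]

-- ===== VERDICT (by name: the statement is the Claim_ definition above) =====
theorem longestVPath_spec : Claim_equal_longestVPath := by
  intro grid _ _
  unfold Spec_longestVPath longestVPath longestVPath_alt
  simp only [pvCell_eq]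
  refine finalFold grid (PySem.List.len grid) (PySem.List.len (PySem.List.pyGetD grid 0 []))
    (grid.length + (grid.headD []).length + 1) _ ?_
  intro d0 i j hd0 hd4 hi1 hi2 hj1 hj2
  have hn : PySem.List.len grid = (grid.length : Int) := by simp [PySem.List.len]
  have hm : PySem.List.len (PySem.List.pyGetD grid 0 []) = ((grid.headD []).length : Int) := by
    cases grid <;> simp [PySem.List.len, PySem.List.pyGetD, PySem.List.pyGet?, PySem.List.pyIdx?]
  have hcap : ∀ (r c d' : Int) (turn : Bool),
      0 ≤ r → r < PySem.List.len grid → 0 ≤ c → c < PySem.List.len (PySem.List.pyGetD grid 0 []) →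
      0 ≤ d' → d' < 4 →
      pvCap (PySem.List.len grid) (PySem.List.len (PySem.List.pyGetD grid 0 [])) r c d' turn <
        ((grid.length + (grid.headD []).length + 1 : Nat) : Int) := by
    intro r c d' turn h1 h2 h3 h4' _ _
    rw [hn] at h2 ⊢
    rw [hm] at h4' ⊢
    unfold pvCap
    split_ifs <;> push_cast <;> omega
  simp only [show PySem.List.pyRange 0 4 1 = [0, 1, 2, 3] from by decide,
    List.foldl_cons, List.foldl_nil]
  have hsdAll : ∀ (d0 r c : Int), 0 ≤ d0 → d0 < 4 →
      0 ≤ r → r < PySem.List.len grid → 0 ≤ c → c < PySem.List.len (PySem.List.pyGetD grid 0 []) →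
      (pvSweepS grid (PySem.List.len grid) (PySem.List.len (PySem.List.pyGetD grid 0 [])) 3
        (pvSweepS grid (PySem.List.len grid) (PySem.List.len (PySem.List.pyGetD grid 0 [])) 2
          (pvSweepS grid (PySem.List.len grid) (PySem.List.len (PySem.List.pyGetD grid 0 [])) 1
            (pvSweepS grid (PySem.List.len grid) (PySem.List.len (PySem.List.pyGetD grid 0 [])) 0
              PySem.Dict.empty)))).getD (d0, r, c) 0 =
        pvE grid (PySem.List.len grid) (PySem.List.len (PySem.List.pyGetD grid 0 []))
          (grid.length + (grid.headD []).length + 1) r c d0 true := by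
    intro d0 r c hd0 hd4 h1 h2 h3 h4'
    rw [sweepS_getD grid _ _ _ 3 (by norm_num) (by norm_num) hcap,
      sweepS_getD grid _ _ _ 2 (by norm_num) (by norm_num) hcap,
      sweepS_getD grid _ _ _ 1 (by norm_num) (by norm_num) hcap,
      sweepS_getD grid _ _ _ 0 (by norm_num) (by norm_num) hcap]
    interval_cases d0
    · rw [if_neg (fun h => absurd h.1 (by decide)), if_neg (fun h => absurd h.1 (by decide)),
        if_neg (fun h => absurd h.1 (by decide)), if_pos ⟨rfl, h1, h2, h3, h4'⟩]
    · rw [if_neg (fun h => absurd h.1 (by decide)), if_neg (fun h => absurd h.1 (by decide)),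
        if_pos ⟨rfl, h1, h2, h3, h4'⟩]
    · rw [if_neg (fun h => absurd h.1 (by decide)), if_pos ⟨rfl, h1, h2, h3, h4'⟩]
    · rw [if_pos ⟨rfl, h1, h2, h3, h4'⟩]
  have hsd3 : ∀ (r c : Int),
      0 ≤ r → r < PySem.List.len grid → 0 ≤ c → c < PySem.List.len (PySem.List.pyGetD grid 0 []) →
      (pvSweepS grid (PySem.List.len grid) (PySem.List.len (PySem.List.pyGetD grid 0 [])) 3
        (pvSweepS grid (PySem.List.len grid) (PySem.List.len (PySem.List.pyGetD grid 0 [])) 2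
          (pvSweepS grid (PySem.List.len grid) (PySem.List.len (PySem.List.pyGetD grid 0 [])) 1
            (pvSweepS grid (PySem.List.len grid) (PySem.List.len (PySem.List.pyGetD grid 0 [])) 0
              PySem.Dict.empty)))).getD (PySem.Int.mod (3 + 1) 4, r, c) 0 =
        pvE grid (PySem.List.len grid) (PySem.List.len (PySem.List.pyGetD grid 0 []))
          (grid.length + (grid.headD []).length + 1) r c (pvClockwise 3) true := by
    intro r c h1 h2 h3 h4'
    rw [show PySem.Int.mod (3 + 1) 4 = (0 : Int) from by decide,
      show pvClockwise 3 = (0 : Int) from by decide]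
    exact hsdAll 0 r c (by norm_num) (by norm_num) h1 h2 h3 h4'
  have hsd2 : ∀ (r c : Int),
      0 ≤ r → r < PySem.List.len grid → 0 ≤ c → c < PySem.List.len (PySem.List.pyGetD grid 0 []) →
      (pvSweepS grid (PySem.List.len grid) (PySem.List.len (PySem.List.pyGetD grid 0 [])) 3
        (pvSweepS grid (PySem.List.len grid) (PySem.List.len (PySem.List.pyGetD grid 0 [])) 2
          (pvSweepS grid (PySem.List.len grid) (PySem.List.len (PySem.List.pyGetD grid 0 [])) 1
            (pvSweepS grid (PySem.List.len grid) (PySem.List.len (PySem.List.pyGetD grid 0 [])) 0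
              PySem.Dict.empty)))).getD (PySem.Int.mod (2 + 1) 4, r, c) 0 =
        pvE grid (PySem.List.len grid) (PySem.List.len (PySem.List.pyGetD grid 0 []))
          (grid.length + (grid.headD []).length + 1) r c (pvClockwise 2) true := by
    intro r c h1 h2 h3 h4'
    rw [show PySem.Int.mod (2 + 1) 4 = (3 : Int) from by decide,
      show pvClockwise 2 = (3 : Int) from by decide]
    exact hsdAll 3 r c (by norm_num) (by norm_num) h1 h2 h3 h4'
  have hsd1 : ∀ (r c : Int),
      0 ≤ r → r < PySem.List.len grid → 0 ≤ c → c < PySem.List.len (PySem.List.pyGetD grid 0 []) →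
      (pvSweepS grid (PySem.List.len grid) (PySem.List.len (PySem.List.pyGetD grid 0 [])) 3
        (pvSweepS grid (PySem.List.len grid) (PySem.List.len (PySem.List.pyGetD grid 0 [])) 2
          (pvSweepS grid (PySem.List.len grid) (PySem.List.len (PySem.List.pyGetD grid 0 [])) 1
            (pvSweepS grid (PySem.List.len grid) (PySem.List.len (PySem.List.pyGetD grid 0 [])) 0
              PySem.Dict.empty)))).getD (PySem.Int.mod (1 + 1) 4, r, c) 0 =
        pvE grid (PySem.List.len grid) (PySem.List.len (PySem.List.pyGetD grid 0 []))
          (grid.length + (grid.headD []).length + 1) r c (pvClockwise 1) true := by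
    intro r c h1 h2 h3 h4'
    rw [show PySem.Int.mod (1 + 1) 4 = (2 : Int) from by decide,
      show pvClockwise 1 = (2 : Int) from by decide]
    exact hsdAll 2 r c (by norm_num) (by norm_num) h1 h2 h3 h4'
  have hsd0 : ∀ (r c : Int),
      0 ≤ r → r < PySem.List.len grid → 0 ≤ c → c < PySem.List.len (PySem.List.pyGetD grid 0 []) →
      (pvSweepS grid (PySem.List.len grid) (PySem.List.len (PySem.List.pyGetD grid 0 [])) 3
        (pvSweepS grid (PySem.List.len grid) (PySem.List.len (PySem.List.pyGetD grid 0 [])) 2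
          (pvSweepS grid (PySem.List.len grid) (PySem.List.len (PySem.List.pyGetD grid 0 [])) 1
            (pvSweepS grid (PySem.List.len grid) (PySem.List.len (PySem.List.pyGetD grid 0 [])) 0
              PySem.Dict.empty)))).getD (PySem.Int.mod (0 + 1) 4, r, c) 0 =
        pvE grid (PySem.List.len grid) (PySem.List.len (PySem.List.pyGetD grid 0 []))
          (grid.length + (grid.headD []).length + 1) r c (pvClockwise 0) true := by
    intro r c h1 h2 h3 h4'
    rw [show PySem.Int.mod (0 + 1) 4 = (1 : Int) from by decide,
      show pvClockwise 0 = (1 : Int) from by decide]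
    exact hsdAll 1 r c (by norm_num) (by norm_num) h1 h2 h3 h4'
  rw [sweepB_getD grid _ _ _ 3 (by norm_num) (by norm_num) hcap _ hsd3,
    sweepB_getD grid _ _ _ 2 (by norm_num) (by norm_num) hcap _ hsd2,
    sweepB_getD grid _ _ _ 1 (by norm_num) (by norm_num) hcap _ hsd1,
    sweepB_getD grid _ _ _ 0 (by norm_num) (by norm_num) hcap _ hsd0]
  interval_cases d0
  · rw [if_neg (fun h => absurd h.1 (by decide)), if_neg (fun h => absurd h.1 (by decide)),
      if_neg (fun h => absurd h.1 (by decide)), if_pos ⟨rfl, hi1, hi2, hj1, hj2⟩]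
  · rw [if_neg (fun h => absurd h.1 (by decide)), if_neg (fun h => absurd h.1 (by decide)),
      if_pos ⟨rfl, hi1, hi2, hj1, hj2⟩]
  · rw [if_neg (fun h => absurd h.1 (by decide)), if_pos ⟨rfl, hi1, hi2, hj1, hj2⟩]
  · rw [if_pos ⟨rfl, hi1, hi2, hj1, hj2⟩]
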